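-- pv_equiv track=rewrite | github.com/sidhantm123/ttsky-analog-smoola | test/test_digital_top.py | get_comparator_seq
-- ===== SOURCE A (Python) =====
-- def get_comparator_seq(target):
--     """
--     Compute the 6-element comparator response sequence for a SAR conversion.
--     Returns (seq, recovered_value).
--     """
--     seq, dac = [], 0
--     for bit in range(5, -1, -1):
--         trial = dac | (1 << bit)
--         cmp = 1 if target >= trial else 0
--         seq.append(cmp)
--         if cmp:
--             dac = trial
--     return seq, dac
-- ===== SOURCE B (Python) =====
-- def get_comparator_seq(target):
--     """
--     Compute the 6-element comparator response sequence for a SAR conversion.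
--     Returns (seq, recovered_value).
--     """
--     v = 0 if target < 0 else min(int(target), 63)
--     return [(v >> b) & 1 for b in range(5, -1, -1)], v
-- ===== Notes on version B (the rewrite author's own statement) =====
-- stated objective: simpler
-- what changed: Replaces the sequential SAR bit-by-bit DAC accumulation loop with a closed-form clamp of the target into the DAC range followed by extracting its six-bit MSB-first binary expansion.
import Mathlib
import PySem

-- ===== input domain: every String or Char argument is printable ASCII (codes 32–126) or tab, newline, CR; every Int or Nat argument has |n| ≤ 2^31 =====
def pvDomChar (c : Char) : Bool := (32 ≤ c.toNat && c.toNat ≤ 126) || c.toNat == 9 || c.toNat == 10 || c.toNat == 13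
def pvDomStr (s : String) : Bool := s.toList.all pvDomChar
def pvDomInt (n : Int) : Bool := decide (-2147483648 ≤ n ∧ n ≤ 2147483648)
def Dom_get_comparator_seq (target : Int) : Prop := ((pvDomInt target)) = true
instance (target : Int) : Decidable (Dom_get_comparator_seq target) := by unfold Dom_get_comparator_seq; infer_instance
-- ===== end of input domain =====

-- B replaces A's sequential SAR bit-by-bit DAC accumulation loop with a closed-form
-- clamp of the target into the DAC range plus six-bit MSB-first bit extraction (objective: simpler).

-- ===== PORT A =====
-- loop body of A's 'for bit in range(5, -1, -1)'
def sarStep (target : Int) (st : List Int × Int) (bit : Int) : List Int × Int :=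
  let trial := Int.lor st.2 (Int.shiftLeft 1 bit.toNat)
  let cmp : Int := if target ≥ trial then 1 else 0
  (st.1 ++ [cmp], if cmp ≠ 0 then trial else st.2)

def get_comparator_seq (target : Int) : List Int × Int :=
  (PySem.List.pyRange 5 (-1) (-1)).foldl (sarStep target) ([], 0)

-- ===== PORT B =====
def get_comparator_seq_alt (target : Int) : List Int × Int :=
  let v : Int := if target < 0 then 0 else min target 63
  ((PySem.List.pyRange 5 (-1) (-1)).map (fun b => Int.land (Int.shiftRight v b.toNat) 1), v)

-- ===== PRECONDITION & SPEC =====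
def Spec_get_comparator_seq (target : Int) (out : List Int × Int) : Prop := out = get_comparator_seq_alt target
instance (target : Int) (out : List Int × Int) : Decidable (Spec_get_comparator_seq target out) := by unfold Spec_get_comparator_seq; infer_instance

-- ===== CLAIM (what is proved, stated in full; the proofs are below) =====
def Claim_equal_get_comparator_seq : Prop := ∀ (target : Int), Dom_get_comparator_seq target → Spec_get_comparator_seq target (get_comparator_seq target)

-- ===== LEMMAS AND PROOFS =====

theorem pyRange_lit : PySem.List.pyRange 5 (-1) (-1) = [5, 4, 3, 2, 1, 0] := by
  rw [PySem.List.pyRange_neg_one]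
  decide

-- one SAR step, with the trial value pre-computed as a literal
theorem sarStep_eval (t : Int) (acc : List Int) (d b c : Int)
    (hb : Int.lor d (Int.shiftLeft 1 b.toNat) = c) :
    sarStep t (acc, d) b = if t ≥ c then (acc ++ [1], c) else (acc ++ [0], d) := by
  simp only [sarStep, hb]
  split_ifs <;> simp_all

-- ===== VERDICT (by name: the statement is the Claim_ definition above) =====
theorem get_comparator_seq_spec : Claim_equal_get_comparator_seq := by
  intro target _
  show get_comparator_seq target = get_comparator_seq_alt target
  unfold get_comparator_seq get_comparator_seq_alt
  rw [pyRange_lit]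
  by_cases hneg : target < 0
  · -- all six comparisons fail; the DAC stays 0
    rw [List.foldl_cons, sarStep_eval target _ _ _ 32 (by decide), if_neg (by omega),
        List.foldl_cons, sarStep_eval target _ _ _ 16 (by decide), if_neg (by omega),
        List.foldl_cons, sarStep_eval target _ _ _ 8 (by decide), if_neg (by omega),
        List.foldl_cons, sarStep_eval target _ _ _ 4 (by decide), if_neg (by omega),
        List.foldl_cons, sarStep_eval target _ _ _ 2 (by decide), if_neg (by omega),
        List.foldl_cons, sarStep_eval target _ _ _ 1 (by decide), if_neg (by omega),
        List.foldl_nil, if_pos hneg]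
    decide
  · by_cases hbig : 64 ≤ target
    · -- all six comparisons succeed; the DAC reaches 63
      rw [List.foldl_cons, sarStep_eval target _ _ _ 32 (by decide), if_pos (by omega),
          List.foldl_cons, sarStep_eval target _ _ _ 48 (by decide), if_pos (by omega),
          List.foldl_cons, sarStep_eval target _ _ _ 56 (by decide), if_pos (by omega),
          List.foldl_cons, sarStep_eval target _ _ _ 60 (by decide), if_pos (by omega),
          List.foldl_cons, sarStep_eval target _ _ _ 62 (by decide), if_pos (by omega),
          List.foldl_cons, sarStep_eval target _ _ _ 63 (by decide), if_pos (by omega),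
          List.foldl_nil, if_neg hneg, show min target 63 = 63 by omega]
      decide
    · have h0 : (0:Int) ≤ target := by omega
      have h1 : target ≤ 63 := by omega
      interval_cases target <;> decide
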